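-- pv_equiv track=rewrite | github.com/raistlinJ/core-topo-gen | core_topo_gen/planning/router_host_plan.py | plan_host_router_mapping
-- ===== SOURCE A (Python) =====
-- from typing import Dict, Any, List, Optional
--
-- def _expand_roles(role_counts: Dict[str, int]) -> List[str]:
--     out: List[str] = []
--     for r, c in role_counts.items():
--         out.extend([r] * int(c))
--     return out
--
-- def plan_host_router_mapping(role_counts: Dict[str,int], routers_planned: int) -> Dict[int,int]:
--     """Deterministically assign each host (by sequential index) to a router (round-robin)."""
--     host_router_map: Dict[int,int] = {}
--     expanded = _expand_roles(role_counts)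
--     for idx,_role in enumerate(expanded):
--         host_id = routers_planned + idx + 1
--         if routers_planned > 0:
--             rid = (idx % routers_planned) + 1
--         else:
--             rid = 0
--         host_router_map[host_id] = rid
--     return host_router_map
-- ===== SOURCE B (Python) =====
-- def plan_host_router_mapping(role_counts, routers_planned):
--     total = 0
--     for c in role_counts.values():
--         total += max(0, int(c))
--     return {routers_planned + idx + 1:
--             ((idx % routers_planned) + 1 if routers_planned > 0 else 0)
--             for idx in range(total)}
-- ===== Notes on version B (the rewrite author's own statement) =====
-- stated objective: simpler
-- what changed: The role strings are never used, so B drops the expanded role list entirely: it sums the clamped counts to one total and builds the mapping directly with a dict comprehension over range(total).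
import Mathlib
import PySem

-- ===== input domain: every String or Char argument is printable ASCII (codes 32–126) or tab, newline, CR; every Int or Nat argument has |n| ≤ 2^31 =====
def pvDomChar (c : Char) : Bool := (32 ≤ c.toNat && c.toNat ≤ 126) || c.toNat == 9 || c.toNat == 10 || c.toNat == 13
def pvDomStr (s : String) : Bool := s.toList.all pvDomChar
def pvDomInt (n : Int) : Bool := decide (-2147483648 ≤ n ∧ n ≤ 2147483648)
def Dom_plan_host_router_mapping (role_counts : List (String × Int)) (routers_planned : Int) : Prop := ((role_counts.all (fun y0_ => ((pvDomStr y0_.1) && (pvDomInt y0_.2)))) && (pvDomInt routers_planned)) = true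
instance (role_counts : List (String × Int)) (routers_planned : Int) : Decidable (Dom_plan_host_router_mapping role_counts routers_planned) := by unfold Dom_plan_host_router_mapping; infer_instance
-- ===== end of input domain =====

-- B drops the unused expanded role list: it sums the clamped counts and builds the mapping
-- directly over range(total) (simpler decomposition; return-value equivalence only).

-- ===== PORT A =====
-- [r] * int(c) yields [] for negative c: List.replicate c.toNat is exact (Int.toNat clamps at 0)
def pvExpandRoles (role_counts : List (String × Int)) : List String :=
  role_counts.foldl (fun out p => out ++ List.replicate p.2.toNat p.1) []

def plan_host_router_mapping (role_counts : List (String × Int)) (routers_planned : Int) : List (Int × Int) :=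
  ((PySem.List.enumerate (pvExpandRoles role_counts) 0).foldl
    (fun d p =>
      let host_id := routers_planned + p.1 + 1
      let rid := if routers_planned > 0 then PySem.Int.mod p.1 routers_planned + 1 else 0
      d.insert host_id rid)
    PySem.Dict.empty).items

-- ===== PORT B =====
def plan_host_router_mapping_alt (role_counts : List (String × Int)) (routers_planned : Int) : List (Int × Int) :=
  let total := role_counts.foldl (fun s p => s + max 0 p.2) 0
  -- the keys routers_planned + idx + 1 are pairwise distinct, so the dict comprehension
  -- is exactly this list of pairs in idx order
  (PySem.List.pyRange 0 total 1).map (fun idx =>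
    (routers_planned + idx + 1,
     if routers_planned > 0 then PySem.Int.mod idx routers_planned + 1 else 0))

-- ===== PRECONDITION & SPEC =====
def Spec_plan_host_router_mapping (role_counts : List (String × Int)) (routers_planned : Int) (out : List (Int × Int)) : Prop := out = plan_host_router_mapping_alt role_counts routers_planned
instance (role_counts : List (String × Int)) (routers_planned : Int) (out : List (Int × Int)) : Decidable (Spec_plan_host_router_mapping role_counts routers_planned out) := by unfold Spec_plan_host_router_mapping; infer_instance

-- ===== CLAIM (what is proved, stated in full; the proofs are below) =====
def Claim_equal_plan_host_router_mapping : Prop := ∀ (role_counts : List (String × Int)) (routers_planned : Int), Dom_plan_host_router_mapping role_counts routers_planned → Spec_plan_host_router_mapping role_counts routers_planned (plan_host_router_mapping role_counts routers_planned)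

-- ===== LEMMAS AND PROOFS =====

-- B's running total equals the length of A's expanded list
theorem pv_total_eq_len (role_counts : List (String × Int)) :
    ∀ (acc : List String) (s : Int), s = (acc.length : Int) →
      role_counts.foldl (fun s p => s + max 0 p.2) s
        = ((role_counts.foldl (fun out p => out ++ List.replicate p.2.toNat p.1) acc).length : Int) := by
  induction role_counts with
  | nil => intro acc s hs; simpa using hs
  | cons q rest ih =>
      intro acc s hs
      simp only [List.foldl_cons]
      apply ih
      simp only [List.length_append, List.length_replicate]
      have := Int.toNat_of_nonneg (a := q.2)
      omega

theorem pv_main (xs : List String) (rp : Int) :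
    ((PySem.List.enumerate xs 0).foldl
      (fun d p =>
        let host_id := rp + p.1 + 1
        let rid := if rp > 0 then PySem.Int.mod p.1 rp + 1 else 0
        d.insert host_id rid)
      PySem.Dict.empty).items
    = (PySem.List.pyRange 0 (xs.length : Int) 1).map (fun idx =>
        (rp + idx + 1, if rp > 0 then PySem.Int.mod idx rp + 1 else 0)) := by
  have hmapfst : (PySem.List.enumerate xs 0).map (·.1)
      = PySem.List.pyRange 0 (xs.length : Int) 1 := by
    simpa using PySem.List.map_fst_enumerate xs 0
  have hkeys : ((PySem.List.enumerate xs 0).map (fun p => rp + p.1 + 1)).Nodup := by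
    have : (PySem.List.enumerate xs 0).map (fun p => rp + p.1 + 1)
        = ((PySem.List.enumerate xs 0).map (·.1)).map (fun i => rp + i + 1) := by
      simp [List.map_map, Function.comp]
    rw [this, hmapfst]
    exact (PySem.List.nodup_pyRange_one 0 _).map (fun a b h => by omega)
  have h := PySem.Dict.items_foldl_insert_fresh
      (l := PySem.List.enumerate xs 0)
      (k := fun p => rp + p.1 + 1)
      (v := fun p => if rp > 0 then PySem.Int.mod p.1 rp + 1 else 0)
      (d := PySem.Dict.empty)
      (by intro a _; simp [PySem.Dict.contains_empty]) hkeys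
  simp only [] at h ⊢
  rw [h]
  simp only [PySem.Dict.empty, List.nil_append]
  rw [show ((PySem.List.enumerate xs 0).map
        (fun p => (rp + p.1 + 1, if rp > 0 then PySem.Int.mod p.1 rp + 1 else 0)))
      = ((PySem.List.enumerate xs 0).map (·.1)).map
        (fun i => (rp + i + 1, if rp > 0 then PySem.Int.mod i rp + 1 else 0)) by
    simp [List.map_map, Function.comp]]
  rw [hmapfst]

-- ===== VERDICT (by name: the statement is the Claim_ definition above) =====
theorem plan_host_router_mapping_spec : Claim_equal_plan_host_router_mapping := by
  intro role_counts routers_planned _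
  unfold Spec_plan_host_router_mapping plan_host_router_mapping plan_host_router_mapping_alt
  rw [pv_main, pvExpandRoles, ← pv_total_eq_len role_counts [] 0 (by simp)]
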